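-- pv_equiv track=rewrite | github.com/callmeRambo/comp_6714_pro1 | submission.py | Logarithmic_merge
-- ===== SOURCE A (Python) =====
-- def Logarithmic_merge(index, cut_off, buffer_size): # do not change the heading of the function
--     #pass # **replace** this line with your code
--     index = index[:cut_off]
--     result = [[]]
--     if (buffer_size==0):
--         return result
--     z0 = []
--     while index!=[] or len(z0)==buffer_size:
--         if len(z0)<buffer_size:
--             if index!=[]:
--                 z0.append(index[0])
--                 index = index[1:]
--         else:
--             for i in range (len(result)):
--                 if (len(result[i])+len(z0)<=buffer_size*pow(2,i)):
--                     result[i] +=z0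
--                     z0 = []
--                     break
--                 else:
--                     z0+=result[i]
--                     result[i]=[]
--                     continue
--             if z0!=[]:
--                 result.append(z0)
--                 z0=[]
--     for i in range(len(result)):
--         result[i] = sorted(result[i])
--     #if z0!=[]:
--     result = [sorted(z0)]+result
--     #result.reverse()
--     return result
-- ===== SOURCE B (Python) =====
-- def Logarithmic_merge(index, cut_off, buffer_size):
--     index = index[:cut_off]
--     if buffer_size == 0:
--         return [[]]
--     q = len(index) // buffer_size
--     nbits = max(q.bit_length(), 1)
--
--     def levels(n, pos):
--         # levels for bits 0..n-1 of q, consuming blocks from `pos` highest bit first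
--         if n == 0:
--             return [], pos
--         if (q >> (n - 1)) & 1:
--             size = buffer_size * 2 ** (n - 1)
--             lower, end = levels(n - 1, pos + size)
--             return lower + [sorted(index[pos:pos + size])], end
--         else:
--             lower, end = levels(n - 1, pos)
--             return lower + [[]], end
--
--     lv, pos = levels(nbits, 0)
--     return [sorted(index[pos:])] + lv
-- ===== Notes on version B (the rewrite author's own statement) =====
-- stated objective: faster
-- what changed: Instead of simulating the element-by-element buffer fill and cascading binary-counter merges, B computes q = len(index[:cut_off]) // buffer_size and builds each level directly from q's binary representation, sorting one contiguous slice of the input per set bit; Pre_ only excludes buffer_size < 0 with a non-empty index[:cut_off], where A loops forever (never returns).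
-- outside the precondition, e.g. on Logarithmic_merge([1], 5, -1): A does not finish within the time limit, B returns [[1], []]
import Mathlib
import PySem

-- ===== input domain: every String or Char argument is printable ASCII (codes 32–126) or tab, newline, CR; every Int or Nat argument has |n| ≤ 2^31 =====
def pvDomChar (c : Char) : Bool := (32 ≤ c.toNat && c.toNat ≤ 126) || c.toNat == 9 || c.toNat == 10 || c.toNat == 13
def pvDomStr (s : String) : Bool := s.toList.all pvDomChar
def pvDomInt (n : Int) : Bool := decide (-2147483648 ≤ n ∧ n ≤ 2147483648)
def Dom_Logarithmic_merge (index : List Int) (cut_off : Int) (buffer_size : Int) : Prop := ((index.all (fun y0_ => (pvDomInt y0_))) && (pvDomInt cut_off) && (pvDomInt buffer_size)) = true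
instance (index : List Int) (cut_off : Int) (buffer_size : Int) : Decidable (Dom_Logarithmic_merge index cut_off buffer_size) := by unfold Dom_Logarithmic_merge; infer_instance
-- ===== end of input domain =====

-- B replaces A's element-by-element buffer/cascade simulation by slicing the input directly
-- along the binary representation of q = len(index[:cut_off]) // buffer_size (measurably faster).

-- ===== PORT A =====

-- the `for i in range(len(result))` cascade with its break; returns (z0, result) after the for
def pvCascade (bs : Int) : Nat → List Int → List (List Int) → List Int × List (List Int)
  | _, z0, [] => (z0, [])
  | i, z0, r :: rs =>
    if ((r.length : Int) + (z0.length : Int) ≤ bs * 2 ^ i) then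
      ([], (r ++ z0) :: rs)                                   -- result[i] += z0; z0 = []; break
    else
      let p := pvCascade bs (i + 1) (z0 ++ r) rs              -- z0 += result[i]; result[i] = []
      (p.1, [] :: p.2)

-- A's while loop; fuel only makes it total (2*len+2 suffices whenever the Python loop terminates)
def pvLoopA (bs : Int) : Nat → List Int → List Int → List (List Int) → List Int × List (List Int)
  | 0, _, z0, result => (z0, result)
  | fuel + 1, index, z0, result =>
    if index ≠ [] ∨ (z0.length : Int) = bs then
      if (z0.length : Int) < bs then
        match index with
        | [] => pvLoopA bs fuel [] z0 result
        | x :: rest => pvLoopA bs fuel rest (z0 ++ [x]) result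
      else
        let p := pvCascade bs 0 z0 result
        -- after the for: if z0 != [] then result.append(z0); z0 = [] on every path
        pvLoopA bs fuel index [] (if p.1 ≠ [] then p.2 ++ [p.1] else p.2)
    else (z0, result)

def Logarithmic_merge (index : List Int) (cut_off : Int) (buffer_size : Int) : List (List Int) :=
  let idx := PySem.List.slice index none (some cut_off)
  if buffer_size = 0 then [[]]
  else
    let p := pvLoopA buffer_size (2 * idx.length + 2) idx [] [[]]
    PySem.List.sorted p.1 (fun x => x) false :: p.2.map (fun r => PySem.List.sorted r (fun x => x) false)

-- ===== PORT B =====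

-- levels for bits 0..n-1 of q, consuming blocks from `pos` highest bit first (Source B's `levels`)
def pvLevelsB (idx : List Int) (bs q : Int) : Nat → Int → List (List Int) × Int
  | 0, pos => ([], pos)
  | n + 1, pos =>
    if PySem.Int.mod (PySem.Int.floordiv q (2 ^ n)) 2 = 1 then
      let size := bs * 2 ^ n
      let p := pvLevelsB idx bs q n (pos + size)
      (p.1 ++ [PySem.List.sorted (PySem.List.slice idx (some pos) (some (pos + size))) (fun x => x) false], p.2)
    else
      let p := pvLevelsB idx bs q n pos
      (p.1 ++ [[]], p.2)

def Logarithmic_merge_alt (index : List Int) (cut_off : Int) (buffer_size : Int) : List (List Int) :=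
  let idx := PySem.List.slice index none (some cut_off)
  if buffer_size = 0 then [[]]
  else
    let q : Int := PySem.Int.floordiv (idx.length : Int) buffer_size
    let nbits := max (PySem.Int.bitLength q) 1
    let p := pvLevelsB idx buffer_size q nbits 0
    PySem.List.sorted (PySem.List.slice idx (some p.2) none) (fun x => x) false :: p.1

-- ===== PRECONDITION & SPEC =====

-- Pre_ excludes only buffer_size < 0 together with a non-empty index[:cut_off]: there A's while
-- loop never terminates (it returns no value), so nothing can be matched.
def Pre_Logarithmic_merge (index : List Int) (cut_off : Int) (buffer_size : Int) : Prop :=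
  0 ≤ buffer_size ∨ index = [] ∨ cut_off = 0 ∨ cut_off + (index.length : Int) ≤ 0

instance (index : List Int) (cut_off : Int) (buffer_size : Int) : Decidable (Pre_Logarithmic_merge index cut_off buffer_size) := by unfold Pre_Logarithmic_merge; infer_instance

def pvWitness_Logarithmic_merge : List Int × Int × Int := ([3, 1, 2, 5, 4], 5, 2)

def Spec_Logarithmic_merge (index : List Int) (cut_off : Int) (buffer_size : Int) (out : List (List Int)) : Prop := out = Logarithmic_merge_alt index cut_off buffer_size
instance (index : List Int) (cut_off : Int) (buffer_size : Int) (out : List (List Int)) : Decidable (Spec_Logarithmic_merge index cut_off buffer_size out) := by unfold Spec_Logarithmic_merge; infer_instance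

-- ===== CLAIM (what is proved, stated in full; the proofs are below) =====
def Claim_equal_Logarithmic_merge : Prop := ∀ (index : List Int) (cut_off : Int) (buffer_size : Int), Dom_Logarithmic_merge index cut_off buffer_size → Pre_Logarithmic_merge index cut_off buffer_size → Spec_Logarithmic_merge index cut_off buffer_size (Logarithmic_merge index cut_off buffer_size)

-- ===== LEMMAS AND PROOFS =====

def pvSort (l : List Int) : List Int := PySem.List.sorted l (fun x => x) false

-- forward chunking of the stream into full buffers (oldest chunk first)
def pvChunks (b : Nat) : List Int → List (List Int)
  | [] => []
  | x :: u => (x :: u.take (b - 1)) :: pvChunks b (u.drop (b - 1))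
  termination_by u => u.length
  decreasing_by simp

def pvPairUp : List (List Int) → List (List Int)
  | d0 :: d1 :: rest => (d0 ++ d1) :: pvPairUp rest
  | _ => []

-- closed form of A's result levels after q cascades, D = blocks newest first
def pvCf (q : Nat) (D : List (List Int)) : List (List Int) :=
  if q = 0 then []
  else if q % 2 = 1 then D.headI :: pvCf (q / 2) (pvPairUp D.tail)
  else [] :: pvCf (q / 2) (pvPairUp D)
  termination_by q
  decreasing_by all_goals exact Nat.div_lt_self (by omega) (by omega)

-- one full-buffer insertion (A's cascade + append), as a fold step
def pvStep (bs : Int) (R : List (List Int)) (c : List Int) : List (List Int) :=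
  let p := pvCascade bs 0 c R
  if p.1 ≠ [] then p.2 ++ [p.1] else p.2

-- ---- loop characterisation ----

theorem pvLoopA_fill (b : Nat) (hb : 0 < b) (c : List Int) :
    ∀ (z0 rest : List Int) (R : List (List Int)) (fuel : Nat),
    z0.length + c.length = b →
    pvLoopA (b : Int) (c.length + fuel) (c ++ rest) z0 R = pvLoopA (b : Int) fuel rest (z0 ++ c) R := by
  induction c with
  | nil => intro z0 rest R fuel _; simp
  | cons x c IH =>
    intro z0 rest R fuel hlen
    have hsh : (x :: c).length + fuel = (c.length + fuel) + 1 := by simp; omega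
    have hlt : ((z0.length : Int)) < (b : Int) := by
      have : z0.length < b := by simp at hlen; omega
      exact_mod_cast this
    rw [hsh]
    rw [pvLoopA.eq_def]
    simp only [List.cons_append, ne_eq, reduceCtorEq, not_false_eq_true, true_or, if_true,
      if_pos hlt]
    rw [IH (z0 ++ [x]) rest R fuel (by simp at hlen ⊢; omega)]
    simp

theorem pvLoopA_casc (b : Nat) (z0 rest : List Int) (R : List (List Int)) (fuel : Nat)
    (hz : z0.length = b) :
    pvLoopA (b : Int) (fuel + 1) rest z0 R = pvLoopA (b : Int) fuel rest [] (pvStep (b : Int) R z0) := by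
  have h1 : ((z0.length : Int)) = (b : Int) := by exact_mod_cast hz
  rw [pvLoopA.eq_def]
  simp only [h1, or_true, if_true, lt_self_iff_false, if_false, pvStep]

theorem pvLoopA_drain (b : Nat) (rest : List Int) :
    ∀ (z0 : List Int) (R : List (List Int)) (fuel : Nat),
    z0.length + rest.length < b →
    pvLoopA (b : Int) (rest.length + 1 + fuel) rest z0 R = (z0 ++ rest, R) := by
  induction rest with
  | nil =>
    intro z0 R fuel hlt
    have hne : ((z0.length : Int)) ≠ (b : Int) := by
      have : z0.length ≠ b := by simp at hlt; omega
      exact_mod_cast fun h => this (by exact_mod_cast h)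
    have hsh : ([] : List Int).length + 1 + fuel = fuel + 1 := by simp; omega
    rw [hsh, pvLoopA.eq_def]
    simp [hne]
  | cons x rest IH =>
    intro z0 R fuel hlt
    have hlt' : ((z0.length : Int)) < (b : Int) := by
      have : z0.length < b := by simp at hlt; omega
      exact_mod_cast this
    have hsh : (x :: rest).length + 1 + fuel = (rest.length + 1 + fuel) + 1 := by simp; omega
    rw [hsh, pvLoopA.eq_def]
    simp only [ne_eq, reduceCtorEq, not_false_eq_true, true_or, if_true, if_pos hlt']
    rw [IH (z0 ++ [x]) R fuel (by simp at hlt ⊢; omega)]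
    simp

theorem pvLoopA_chunks (b : Nat) (hb : 0 < b) (cs : List (List Int)) :
    ∀ (rest : List Int) (R : List (List Int)) (fuel : Nat),
    (∀ c ∈ cs, c.length = b) →
    pvLoopA (b : Int) (cs.length * (b + 1) + fuel) (cs.flatten ++ rest) [] R
      = pvLoopA (b : Int) fuel rest [] (cs.foldl (pvStep (b : Int)) R) := by
  induction cs with
  | nil => intro rest R fuel _; simp
  | cons c cs IH =>
    intro rest R fuel hcs
    have hc : c.length = b := hcs c (by simp)
    have hsh : (c :: cs).length * (b + 1) + fuel
        = c.length + ((cs.length * (b + 1) + fuel) + 1) := by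
      simp [hc, Nat.succ_mul]; omega
    rw [hsh, List.flatten_cons, List.append_assoc,
      pvLoopA_fill b hb c [] (cs.flatten ++ rest) R _ (by simp [hc]),
      List.nil_append,
      pvLoopA_casc b c (cs.flatten ++ rest) R _ hc,
      IH rest (pvStep (b : Int) R c) fuel (fun c' hc' => hcs c' (by simp [hc']))]
    simp

-- ---- pairUp / chunks toolbox ----

theorem pvPairUp_length : ∀ (l : List (List Int)), (pvPairUp l).length = l.length / 2
  | [] => by simp [pvPairUp]
  | [d] => by simp [pvPairUp]
  | d0 :: d1 :: rest => by simp [pvPairUp, pvPairUp_length rest]; omega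

theorem pvPairUp_mem_length : ∀ (l : List (List Int)) (s : Nat),
    (∀ d ∈ l, d.length = s) → ∀ e ∈ pvPairUp l, e.length = 2 * s
  | [], _, _ => by simp [pvPairUp]
  | [d], _, _ => by simp [pvPairUp]
  | d0 :: d1 :: rest, s, h => by
    simp only [pvPairUp, List.mem_cons]
    rintro e (rfl | he)
    · simp_all; omega
    · exact pvPairUp_mem_length rest s (fun d hd => h d (by simp [hd])) e he

theorem pvPairUp_drop (m : Nat) : ∀ (l : List (List Int)),
    (pvPairUp l).drop m = pvPairUp (l.drop (2 * m)) := by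
  induction m with
  | zero => simp
  | succ m IH =>
    intro l
    match l with
    | [] => simp [pvPairUp]
    | [d] =>
      rw [List.drop_eq_nil_of_le (as := [d]) (by simp only [List.length_cons, List.length_nil]; omega)]
      rfl
    | d0 :: d1 :: rest =>
      have h2 : 2 * (m + 1) = 2 * m + 1 + 1 := by omega
      simp only [pvPairUp, h2, List.drop_succ_cons, IH rest]

theorem pvPairUp_take_flatten (m : Nat) : ∀ (l : List (List Int)), l.length % 2 = 0 →
    ((pvPairUp l).take m).flatten = (l.take (2 * m)).flatten := by
  induction m with
  | zero => simp
  | succ m IH =>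
    intro l hl
    match l with
    | [] => simp [pvPairUp]
    | [d] => simp at hl
    | d0 :: d1 :: rest =>
      have h2 : 2 * (m + 1) = 2 * m + 1 + 1 := by omega
      have hr : rest.length % 2 = 0 := by simp at hl; omega
      simp only [pvPairUp, h2, List.take_succ_cons, List.flatten_cons, IH rest hr,
        List.append_assoc]

theorem pvChunks_cons (b : Nat) (hb : 0 < b) (u : List Int) (hu : u ≠ []) :
    pvChunks b u = u.take b :: pvChunks b (u.drop b) := by
  match u with
  | [] => exact absurd rfl hu
  | x :: v =>
    obtain ⟨b', rfl⟩ : ∃ b', b = b' + 1 := ⟨b - 1, by omega⟩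
    simp [pvChunks]

theorem pvChunks_flatten (b : Nat) (hb : 0 < b) : ∀ (u : List Int), (pvChunks b u).flatten = u := by
  intro u
  fun_induction pvChunks b u with
  | case1 => simp [pvChunks]
  | case2 x v IH =>
    simp only [pvChunks, List.flatten_cons, IH, List.cons_append]
    rw [List.take_append_drop]

theorem pvChunks_mem_length (b : Nat) (hb : 0 < b) (u : List Int) : ∀ (m : Nat), u.length = m * b →
    ∀ c ∈ pvChunks b u, c.length = b := by
  fun_induction pvChunks b u with
  | case1 => intro m _ c hc; simp [pvChunks] at hc
  | case2 x v IH =>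
    intro m hlen c hc
    obtain ⟨m', rfl⟩ : ∃ m', m = m' + 1 := by
      rcases m with _ | m'
      · simp at hlen
      · exact ⟨m', rfl⟩
    rw [Nat.succ_mul] at hlen
    simp only [pvChunks, List.mem_cons] at hc
    rcases hc with rfl | hc
    · simp at hlen ⊢; omega
    · refine IH m' ?_ c hc
      simp at hlen ⊢; omega

theorem pvChunks_length (b : Nat) (hb : 0 < b) (u : List Int) : ∀ (m : Nat), u.length = m * b →
    (pvChunks b u).length = m := by
  fun_induction pvChunks b u with
  | case1 =>
    intro m h
    simp only [List.length_nil] at h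
    rcases Nat.mul_eq_zero.mp h.symm with h' | h'
    · simp [pvChunks, h']
    · omega
  | case2 x v IH =>
    intro m hlen
    obtain ⟨m', rfl⟩ : ∃ m', m = m' + 1 := by
      rcases m with _ | m'
      · simp at hlen
      · exact ⟨m', rfl⟩
    rw [Nat.succ_mul] at hlen
    simp only [pvChunks, List.length_cons]
    rw [IH m' (by simp at hlen ⊢; omega)]

theorem pvChunks_drop (b : Nat) (hb : 0 < b) : ∀ (j : Nat) (u : List Int),
    (pvChunks b u).drop j = pvChunks b (u.drop (j * b)) := by
  intro j
  induction j with
  | zero => simp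
  | succ j IH =>
    intro u
    by_cases hu : u = []
    · subst hu; simp [pvChunks]
    · rw [pvChunks_cons b hb u hu, List.drop_succ_cons, IH (u.drop b), List.drop_drop,
        Nat.succ_mul, Nat.add_comm b (j * b)]

theorem pvChunks_take_flatten (b : Nat) (hb : 0 < b) : ∀ (k : Nat) (u : List Int),
    ((pvChunks b u).take k).flatten = u.take (k * b) := by
  intro k
  induction k with
  | zero => simp
  | succ k IH =>
    intro u
    by_cases hu : u = []
    · subst hu; simp [pvChunks]
    · rw [pvChunks_cons b hb u hu, List.take_succ_cons, List.flatten_cons, IH (u.drop b),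
        ← List.take_add, Nat.succ_mul, Nat.add_comm b (k * b)]

theorem pvFlatten_reverse_perm (l : List (List Int)) : l.reverse.flatten.Perm l.flatten := by
  induction l with
  | nil => simp
  | cons a l IH =>
    simp only [List.reverse_cons, List.flatten_append, List.flatten_cons, List.flatten_nil,
      List.append_nil]
    exact (List.perm_append_comm).trans (IH.append_left a)

-- ---- cf characterisation ----

theorem pvStep_cf (b : Nat) (hb : 0 < b) : ∀ (k : Nat) (i : Nat) (D : List (List Int)) (z0 : List Int),
    D.length = k → (∀ d ∈ D, d.length = b * 2 ^ i) → z0.length = b * 2 ^ i →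
    (let p := pvCascade (b : Int) i z0 (pvCf k D)
     (if p.1 ≠ [] then p.2 ++ [p.1] else p.2)) = pvCf (k + 1) (z0 :: D) := by
  intro k
  induction k using Nat.strong_induction_on with
  | _ k IH =>
    intro i D z0 hD hd hz
    have hB : 0 < b * 2 ^ i := by positivity
    have hzne : z0 ≠ [] := List.ne_nil_of_length_pos (by omega)
    by_cases hk0 : k = 0
    · subst hk0
      have hDnil : D = [] := List.length_eq_zero_iff.mp hD
      subst hDnil
      simp [pvCf, pvCascade, pvPairUp, hzne]
    · rcases Nat.mod_two_eq_zero_or_one k with hpar | hpar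
      · -- k even
        have hcf : pvCf k D = [] :: pvCf (k / 2) (pvPairUp D) := by
          rw [pvCf]; simp [hk0, hpar]
        have hcond : ((List.length ([] : List Int) : Int) + (z0.length : Int) ≤ (b : Int) * 2 ^ i) := by
          rw [hz]; push_cast; simp
        have hcasc : pvCascade (b : Int) i z0 (pvCf k D)
            = ([], z0 :: pvCf (k / 2) (pvPairUp D)) := by
          rw [hcf]
          simp only [pvCascade, if_pos hcond, List.nil_append]
        have hrhs : pvCf (k + 1) (z0 :: D)
            = z0 :: pvCf (k / 2) (pvPairUp D) := by
          rw [pvCf]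
          have h1 : (k + 1) % 2 = 1 := by omega
          have h2 : (k + 1) / 2 = k / 2 := by omega
          simp [h1, h2]
        simp only [hcasc, hrhs, ne_eq, not_true_eq_false, if_false]
      · -- k odd
        obtain ⟨d, D', rfl⟩ : ∃ d D', D = d :: D' := by
          cases D with
          | nil => simp at hD; omega
          | cons d D' => exact ⟨d, D', rfl⟩
        have hdlen : d.length = b * 2 ^ i := hd d (by simp)
        have hcf : pvCf k (d :: D') = d :: pvCf (k / 2) (pvPairUp D') := by
          rw [pvCf]; simp [hk0, hpar, pvPairUp]
        have hcond : ¬ ((d.length : Int) + (z0.length : Int) ≤ (b : Int) * 2 ^ i) := by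
          have hcast : ((b : Int) * 2 ^ i) = ((b * 2 ^ i : Nat) : Int) := by push_cast; ring
          rw [hz, hdlen, hcast]
          exact_mod_cast (show ¬ (b * 2 ^ i + b * 2 ^ i ≤ b * 2 ^ i) by omega)
        have hcasc : pvCascade (b : Int) i z0 (pvCf k (d :: D'))
            = ((pvCascade (b : Int) (i + 1) (z0 ++ d) (pvCf (k / 2) (pvPairUp D'))).1,
               [] :: (pvCascade (b : Int) (i + 1) (z0 ++ d) (pvCf (k / 2) (pvPairUp D'))).2) := by
          rw [hcf]
          simp only [pvCascade, if_neg hcond]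
        have hIH := IH (k / 2) (Nat.div_lt_self (by omega) (by omega)) (i + 1)
          (pvPairUp D') (z0 ++ d)
          (by rw [pvPairUp_length]; simp at hD; omega)
          (by
            intro e he
            have := pvPairUp_mem_length D' (b * 2 ^ i) (fun d' hd' => hd d' (by simp [hd'])) e he
            rw [this, pow_succ]; ring)
          (by simp [hz, hdlen, pow_succ]; ring)
        simp only at hIH
        have hrhs : pvCf (k + 1) (z0 :: d :: D')
            = [] :: pvCf (k / 2 + 1) ((z0 ++ d) :: pvPairUp D') := by
          rw [pvCf]
          have h1 : ¬ (k + 1) % 2 = 1 := by omega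
          have h2 : (k + 1) / 2 = k / 2 + 1 := by omega
          simp [h1, h2, pvPairUp]
        rw [hcasc] at *
        simp only [hrhs, ← hIH]
        split_ifs <;> simp

theorem pvFoldl_cf (b : Nat) (hb : 0 < b) : ∀ (cs : List (List Int)) (k : Nat) (D : List (List Int)),
    D.length = k → (∀ d ∈ D, d.length = b) → (∀ c ∈ cs, c.length = b) →
    cs.foldl (pvStep (b : Int)) (pvCf k D) = pvCf (k + cs.length) (cs.reverse ++ D) := by
  intro cs
  induction cs with
  | nil => intro k D hD _ _; simp
  | cons c cs IH =>
    intro k D hD hd hcs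
    have hstep : pvStep (b : Int) (pvCf k D) c = pvCf (k + 1) (c :: D) := by
      have := pvStep_cf b hb k 0 D c hD
        (by intro d hdm; rw [hd d hdm]; simp)
        (by rw [hcs c (by simp)]; simp)
      simpa [pvStep] using this
    rw [List.foldl_cons, hstep,
      IH (k + 1) (c :: D) (by simp [hD]) ?hmem (fun c' hc' => hcs c' (by simp [hc']))]
    case hmem =>
      intro d hdm
      rcases List.mem_cons.mp hdm with rfl | hdm
      · exact hcs d (by simp)
      · exact hd d hdm
    rw [List.reverse_cons, List.append_assoc]
    congr 1
    simp
    omega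

theorem pvCf_length : ∀ (q : Nat) (D : List (List Int)),
    (pvCf q D).length = PySem.Int.bitLength (q : Int) := by
  intro q
  induction q using Nat.strong_induction_on with
  | _ q IH =>
    intro D
    by_cases hq : q = 0
    · subst hq; simp [pvCf, PySem.Int.bitLength_zero]
    · have hbl : PySem.Int.bitLength (q : Int) = PySem.Int.bitLength ((q / 2 : Nat) : Int) + 1 :=
        PySem.Int.bitLength_natCast (by omega)
      have hlt : q / 2 < q := Nat.div_lt_self (by omega) (by omega)
      rw [pvCf]
      rcases Nat.mod_two_eq_zero_or_one q with hpar | hpar <;>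
        simp [hq, hpar, IH (q / 2) hlt, hbl]

theorem pvCf_getD : ∀ (q : Nat) (D : List (List Int)), D.length = q → ∀ (i : Nat),
    (pvCf q D).getD i []
      = if (q / 2 ^ i) % 2 = 1 then ((D.drop (q % 2 ^ i)).take (2 ^ i)).flatten else [] := by
  intro q
  induction q using Nat.strong_induction_on with
  | _ q IH =>
    intro D hD i
    by_cases hq : q = 0
    · subst hq
      have h0 : (0 / 2 ^ i) % 2 = 0 := by simp
      simp [pvCf, h0]
    · have hlt : q / 2 < q := Nat.div_lt_self (by omega) (by omega)
      rcases Nat.mod_two_eq_zero_or_one q with hpar | hpar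
      · -- q even
        have hcf : pvCf q D = [] :: pvCf (q / 2) (pvPairUp D) := by
          rw [pvCf]; simp [hq, hpar]
        rw [hcf]
        cases i with
        | zero =>
          simp only [List.getD_cons_zero, pow_zero, pow_one]
          rw [if_neg (by omega)]
        | succ i =>
          have hDev : D.length % 2 = 0 := by omega
          have hdd : q / 2 / 2 ^ i = q / 2 ^ (i + 1) := by
            rw [Nat.div_div_eq_div_mul, pow_succ']
          have hDev2 : (D.drop (2 * (q / 2 % 2 ^ i))).length % 2 = 0 := by
            simp only [List.length_drop]; omega
          have hmod : q % 2 ^ (i + 1) = 2 * (q / 2 % 2 ^ i) := by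
            rw [pow_succ', Nat.mod_mul]; omega
          rw [List.getD_cons_succ,
            IH (q / 2) hlt (pvPairUp D) (by rw [pvPairUp_length]; omega) i,
            hdd]
          by_cases hbit : (q / 2 ^ (i + 1)) % 2 = 1
          · rw [if_pos hbit, if_pos hbit, pvPairUp_drop,
              pvPairUp_take_flatten _ _ hDev2, hmod, pow_succ']
          · rw [if_neg hbit, if_neg hbit]
      · -- q odd
        obtain ⟨d, D', rfl⟩ : ∃ d D', D = d :: D' := by
          cases D with
          | nil => simp at hD; omega
          | cons d D' => exact ⟨d, D', rfl⟩
        have hcf : pvCf q (d :: D') = d :: pvCf (q / 2) (pvPairUp D') := by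
          rw [pvCf]; simp [hq, hpar, pvPairUp]
        rw [hcf]
        cases i with
        | zero =>
          simp only [List.getD_cons_zero, pow_zero, pow_one]
          rw [if_pos (by omega), Nat.mod_one, List.drop_zero,
            show (1 : Nat) = 0 + 1 from rfl, List.take_succ_cons, List.take_zero,
            List.flatten_cons, List.flatten_nil, List.append_nil]
        | succ i =>
          have hDev : D'.length % 2 = 0 := by simp at hD; omega
          have hdd : q / 2 / 2 ^ i = q / 2 ^ (i + 1) := by
            rw [Nat.div_div_eq_div_mul, pow_succ']
          have hDev2 : (D'.drop (2 * (q / 2 % 2 ^ i))).length % 2 = 0 := by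
            simp only [List.length_drop]; omega
          have hmod : q % 2 ^ (i + 1) = 2 * (q / 2 % 2 ^ i) + 1 := by
            rw [pow_succ', Nat.mod_mul]; omega
          rw [List.getD_cons_succ,
            IH (q / 2) hlt (pvPairUp D') (by rw [pvPairUp_length]; simp at hD; omega) i,
            hdd]
          by_cases hbit : (q / 2 ^ (i + 1)) % 2 = 1
          · rw [if_pos hbit, if_pos hbit, pvPairUp_drop,
              pvPairUp_take_flatten _ _ hDev2, hmod, pow_succ', List.drop_succ_cons]
          · rw [if_neg hbit, if_neg hbit]

-- ---- B-side characterisation ----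

theorem pvLevelsB_spec (idx : List Int) (b : Nat) (q : Nat) : ∀ (n : Nat) (pos : Nat),
    pvLevelsB idx (b : Int) (q : Int) n (pos : Int)
      = ((List.range n).map (fun i =>
            if (q / 2 ^ i) % 2 = 1 then
              pvSort ((idx.drop (pos + b * (q % 2 ^ n - q % 2 ^ (i + 1)))).take (b * 2 ^ i))
            else []),
         ((pos + b * (q % 2 ^ n) : Nat) : Int)) := by
  intro n
  induction n with
  | zero => intro pos; simp [pvLevelsB]
  | succ n IHn =>
    intro pos
    have hbiteq : (PySem.Int.mod (PySem.Int.floordiv ((q : Nat) : Int) ((2 : Int) ^ n)) 2 = 1)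
        ↔ ((q / 2 ^ n) % 2 = 1) := by
      rw [show ((2 : Int) ^ n) = ((2 ^ n : Nat) : Int) by push_cast; ring,
        PySem.Int.floordiv_natCast, show (2 : Int) = ((2 : Nat) : Int) from rfl,
        PySem.Int.mod_natCast]
      exact_mod_cast Iff.rfl
    have hle : ∀ i, i < n → q % 2 ^ (i + 1) ≤ q % 2 ^ n := fun i hi => by
      calc q % 2 ^ (i + 1) = q % 2 ^ n % 2 ^ (i + 1) :=
            (Nat.mod_mod_of_dvd q (pow_dvd_pow 2 (by omega))).symm
        _ ≤ q % 2 ^ n := Nat.mod_le _ _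
    have hmodsucc : q % 2 ^ (n + 1) = q % 2 ^ n + 2 ^ n * ((q / 2 ^ n) % 2) := by
      rw [pow_succ]; exact Nat.mod_mul
    rw [pvLevelsB]
    simp only [List.range_succ, List.map_append, List.map_cons, List.map_nil]
    by_cases hbit : (q / 2 ^ n) % 2 = 1
    · rw [if_pos (hbiteq.mpr hbit)]
      have hps : ((pos : Nat) : Int) + (b : Int) * 2 ^ n = (((pos + b * 2 ^ n : Nat)) : Int) := by
        push_cast; ring
      simp only [hps, IHn (pos + b * 2 ^ n)]
      rw [Prod.mk.injEq]
      refine ⟨?_, ?_⟩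
      · congr 1
        · refine List.map_congr_left (fun i hi => ?_)
          rw [List.mem_range] at hi
          by_cases hbi : (q / 2 ^ i) % 2 = 1
          · rw [if_pos hbi, if_pos hbi]
            have hsub : q % 2 ^ (n + 1) - q % 2 ^ (i + 1)
                = (q % 2 ^ n - q % 2 ^ (i + 1)) + 2 ^ n := by
              have := hle i hi
              rw [hmodsucc, hbit, mul_one]
              omega
            have harg : (pos + b * 2 ^ n) + b * (q % 2 ^ n - q % 2 ^ (i + 1))
                = pos + b * (q % 2 ^ (n + 1) - q % 2 ^ (i + 1)) := by
              rw [hsub, Nat.mul_add]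
              omega
            rw [harg]
          · rw [if_neg hbi, if_neg hbi]
        · have hzero : q % 2 ^ (n + 1) - q % 2 ^ (n + 1) = 0 := by omega
          rw [if_pos hbit, hzero, Nat.mul_zero, Nat.add_zero,
            PySem.List.slice_natCast,
            show pos + b * 2 ^ n - pos = b * 2 ^ n by omega]
          simp [pvSort]
      · have hsnd : pos + b * 2 ^ n + b * (q % 2 ^ n) = pos + b * (q % 2 ^ (n + 1)) := by
          rw [hmodsucc, hbit, mul_one, Nat.mul_add]
          omega
        rw [hsnd]
    · rw [if_neg (fun h => hbit (hbiteq.mp h))]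
      simp only [IHn pos]
      have heq : q % 2 ^ (n + 1) = q % 2 ^ n := by
        have h0 : (q / 2 ^ n) % 2 = 0 := by omega
        rw [hmodsucc, h0, Nat.mul_zero, Nat.add_zero]
      rw [Prod.mk.injEq]
      refine ⟨?_, ?_⟩
      · rw [if_neg hbit]
        congr 1
        refine List.map_congr_left (fun i hi => ?_)
        rw [heq]
      · rw [heq]

-- ---- assembly ----

theorem pvSort_perm_eq (xs ys : List Int) (h : xs.Perm ys) : pvSort xs = pvSort ys := by
  exact PySem.List.sorted_eq_sorted_of_perm xs ys (fun x => x) (fun a b hab => hab) h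

theorem core_loopA (b : Nat) (hb : 0 < b) (q : Nat) (hq : 1 ≤ q) (u rest : List Int)
    (hu : u.length = q * b) (hr : rest.length < b) :
    pvLoopA (b : Int) (2 * (u ++ rest).length + 2) (u ++ rest) [] [[]]
      = (rest, pvCf q (pvChunks b u).reverse) := by
  have hcs_mem := pvChunks_mem_length b hb u q hu
  have hcs_len := pvChunks_length b hb u q hu
  obtain ⟨F, hF⟩ : ∃ F, 2 * (u ++ rest).length + 2
      = (pvChunks b u).length * (b + 1) + (rest.length + 1 + F) := by
    refine ⟨2 * (u ++ rest).length + 2 - ((pvChunks b u).length * (b + 1) + rest.length + 1), ?_⟩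
    rw [hcs_len]
    have h1 : q * (b + 1) = q * b + q := by ring
    have h2 : q ≤ q * b := Nat.le_mul_of_pos_right q hb
    simp only [List.length_append, hu]
    omega
  have hA' : pvLoopA (b : Int) (2 * (u ++ rest).length + 2) ((pvChunks b u).flatten ++ rest) [] [[]]
      = (rest, (pvChunks b u).foldl (pvStep (b : Int)) [[]]) := by
    rw [hF, pvLoopA_chunks b hb _ rest [[]] _ hcs_mem,
      pvLoopA_drain b rest [] _ F (by simpa using hr)]
    simp
  rw [pvChunks_flatten b hb u] at hA'
  rw [hA']
  obtain ⟨c, cs', hceq⟩ : ∃ c cs', pvChunks b u = c :: cs' := by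
    cases h : pvChunks b u with
    | nil => rw [h] at hcs_len; simp at hcs_len; omega
    | cons c cs' => exact ⟨c, cs', rfl⟩
  have hc : c.length = b := hcs_mem c (by rw [hceq]; simp)
  have hstep1 : pvStep (b : Int) [[]] c = pvCf 1 [c] := by
    simp [pvStep, pvCascade, pvCf, pvPairUp, hc]
  have hq1 : 1 + cs'.length = q := by
    rw [hceq] at hcs_len; simp at hcs_len; omega
  rw [hceq, List.foldl_cons, hstep1,
    pvFoldl_cf b hb cs' 1 [c] (by simp)
      (by intro d hd; simp at hd; subst hd; exact hc)
      (fun c' hc' => hcs_mem c' (by rw [hceq]; simp [hc'])),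
    hq1, List.reverse_cons]

theorem core_eq (idx : List Int) (b : Nat) (hb : 0 < b) :
    (let p := pvLoopA (b : Int) (2 * idx.length + 2) idx [] [[]]
     pvSort p.1 :: p.2.map pvSort)
    = (let q : Int := PySem.Int.floordiv (idx.length : Int) (b : Int)
       let nbits := max (PySem.Int.bitLength q) 1
       let p := pvLevelsB idx (b : Int) q nbits 0
       pvSort (PySem.List.slice idx (some p.2) none) :: p.1) := by
  simp only
  have hfd : PySem.Int.floordiv (idx.length : Int) (b : Int) = ((idx.length / b : Nat) : Int) :=
    PySem.Int.floordiv_natCast _ _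
  set q : Nat := idx.length / b with hqdef
  by_cases hq0 : q = 0
  · -- fewer than b elements: everything stays in z0
    have hnb : idx.length < b := by
      rcases Nat.div_eq_zero_iff.mp (hqdef ▸ hq0) with h | h
      · omega
      · exact h
    have hdrain := pvLoopA_drain b idx [] [[]] (idx.length + 1) (by simpa using hnb)
    rw [show 2 * idx.length + 2 = idx.length + 1 + (idx.length + 1) by omega, hdrain]
    rw [hfd, hq0]
    simp only [Nat.cast_zero, PySem.Int.bitLength_zero]
    rw [show (max 0 1 : Nat) = 1 from rfl]
    have hlev := pvLevelsB_spec idx b 0 1 0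
    simp only [Nat.cast_zero] at hlev
    rw [hlev]
    simp [pvSort, PySem.Int.bitLength_zero, PySem.List.sorted_eq_nil_iff,
      PySem.List.slice_zero_start, PySem.List.slice_none_none, List.range_succ]
  · -- at least one full buffer
    have hq : 1 ≤ q := Nat.one_le_iff_ne_zero.mpr hq0
    have hqb : q * b ≤ idx.length := Nat.div_mul_le_self _ _
    have hsplit : idx.take (q * b) ++ idx.drop (q * b) = idx := List.take_append_drop _ _
    have hu : (idx.take (q * b)).length = q * b := by simp [List.length_take]; omega
    have hr : (idx.drop (q * b)).length < b := by
      simp only [List.length_drop]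
      have hdm := Nat.div_add_mod idx.length b
      have hmlt := Nat.mod_lt idx.length hb
      have hcomm : q * b = b * (idx.length / b) := by rw [hqdef, Nat.mul_comm]
      omega
    have hA := core_loopA b hb q hq (idx.take (q * b)) (idx.drop (q * b)) hu hr
    rw [hsplit] at hA
    rw [hA]
    set cs := pvChunks b (idx.take (q * b)) with hcsdef
    have hcs_len : cs.length = q := pvChunks_length b hb _ q hu
    set L := PySem.Int.bitLength ((q : Nat) : Int) with hLdef
    have hL1 : 1 ≤ L := by
      rw [hLdef, PySem.Int.bitLength_natCast (show 0 < q by omega)]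
      omega
    rw [hfd, show max L 1 = L by omega]
    have hqlt : q < 2 ^ L := by
      rw [hLdef]
      simpa using PySem.Int.lt_two_pow_bitLength ((q : Nat) : Int)
    have hlev := pvLevelsB_spec idx b q L 0
    simp only [Nat.cast_zero, Nat.zero_add] at hlev
    rw [hlev, Nat.mod_eq_of_lt hqlt, PySem.List.slice_from_natCast]
    congr 1
    · rw [Nat.mul_comm b q]
    · -- the levels agree pointwise
      refine List.ext_getElem ?_ (fun i hi1 hi2 => ?_)
      · rw [List.length_map, pvCf_length, ← hLdef]
        simp
      · have hiL : i < (pvCf q cs.reverse).length := by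
          simpa using hi1
        rw [List.getElem_map, List.getElem_map, List.getElem_range,
          show (pvCf q cs.reverse)[i] = (pvCf q cs.reverse).getD i []
            from (List.getD_eq_getElem _ _ hiL).symm,
          pvCf_getD q cs.reverse (by simp [hcs_len]) i]
        by_cases hbit : (q / 2 ^ i) % 2 = 1
        · rw [if_pos hbit, if_pos hbit]
          have hmodmul : q % 2 ^ (i + 1) = q % 2 ^ i + 2 ^ i := by
            rw [pow_succ, Nat.mod_mul, hbit, Nat.mul_one]
          have hmle : q % 2 ^ i + 2 ^ i ≤ q := by
            have := Nat.mod_le q (2 ^ (i + 1))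
            omega
          have h1 : cs.reverse.drop (q % 2 ^ i) = (cs.take (q - q % 2 ^ i)).reverse := by
            rw [List.reverse_take, hcs_len, show q - (q - q % 2 ^ i) = q % 2 ^ i by omega]
          have h2 : ((cs.take (q - q % 2 ^ i)).reverse).take (2 ^ i)
              = ((cs.take (q - q % 2 ^ i)).drop (q - q % 2 ^ i - 2 ^ i)).reverse := by
            rw [List.reverse_drop]
            congr 1
            rw [List.length_take, hcs_len, Nat.min_eq_left (by omega)]
            omega
          have h3 : (cs.take (q - q % 2 ^ i)).drop (q - q % 2 ^ i - 2 ^ i)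
              = (cs.drop (q - q % 2 ^ i - 2 ^ i)).take (2 ^ i) := by
            rw [List.drop_take]
            congr 1
            omega
          have h4 : ((cs.drop (q - q % 2 ^ i - 2 ^ i)).take (2 ^ i)).flatten
              = ((idx.take (q * b)).drop ((q - q % 2 ^ i - 2 ^ i) * b)).take (2 ^ i * b) := by
            rw [hcsdef, pvChunks_drop b hb, pvChunks_take_flatten b hb]
          have hj : q - q % 2 ^ (i + 1) = q - q % 2 ^ i - 2 ^ i := by omega
          have h6 : 2 ^ i * b ≤ q * b - (q - q % 2 ^ i - 2 ^ i) * b := by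
            rw [← Nat.sub_mul]
            exact Nat.mul_le_mul_right b (by omega)
          have h5 : (idx.drop (b * (q - q % 2 ^ (i + 1)))).take (b * 2 ^ i)
              = ((idx.take (q * b)).drop ((q - q % 2 ^ i - 2 ^ i) * b)).take (2 ^ i * b) := by
            rw [List.drop_take, List.take_take, Nat.min_eq_left h6, hj,
              Nat.mul_comm b (q - q % 2 ^ i - 2 ^ i), Nat.mul_comm b (2 ^ i)]
          rw [h1, h2]
          calc pvSort (((cs.take (q - q % 2 ^ i)).drop (q - q % 2 ^ i - 2 ^ i)).reverse.flatten)
              = pvSort (((cs.take (q - q % 2 ^ i)).drop (q - q % 2 ^ i - 2 ^ i)).flatten) :=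
                pvSort_perm_eq _ _ (pvFlatten_reverse_perm _)
            _ = pvSort ((idx.drop (b * (q - q % 2 ^ (i + 1)))).take (b * 2 ^ i)) := by
                rw [h3, h4, h5]
        · rw [if_neg hbit, if_neg hbit]
          simp [pvSort, PySem.List.sorted_eq_nil_iff]

theorem pv_slice_nil_of_pre (index : List Int) (cut_off : Int)
    (h : index = [] ∨ cut_off = 0 ∨ cut_off + (index.length : Int) ≤ 0) :
    PySem.List.slice index none (some cut_off) = [] := by
  rcases h with rfl | rfl | h
  · simp [PySem.List.slice]
  · rw [show (0 : Int) = ((0 : Nat) : Int) from rfl, PySem.List.slice_to_natCast]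
    simp
  · rcases eq_or_ne index [] with rfl | hne
    · simp [PySem.List.slice]
    · have hlen : 1 ≤ index.length := by
        cases index with
        | nil => exact absurd rfl hne
        | cons a l => simp
      obtain ⟨k, hk, rfl⟩ : ∃ k : Nat, 0 < k ∧ cut_off = -(k : Int) :=
        ⟨(-cut_off).toNat, by omega, by omega⟩
      rw [PySem.List.slice_to_neg_natCast index k hk]
      have : index.length ≤ k := by omega
      simp [Nat.sub_eq_zero_of_le this]

-- ===== VERDICT (by name: the statement is the Claim_ definition above) =====
theorem Logarithmic_merge_spec : Claim_equal_Logarithmic_merge := by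
  intro index cut_off buffer_size _hdom hpre
  unfold Spec_Logarithmic_merge
  by_cases h0 : buffer_size = 0
  · simp [Logarithmic_merge, Logarithmic_merge_alt, h0]
  · by_cases hneg : buffer_size < 0
    · -- buffer_size < 0: Pre_ forces index[:cut_off] = [], both sides return [[], []]
      have hidx : PySem.List.slice index none (some cut_off) = [] := by
        refine pv_slice_nil_of_pre index cut_off ?_
        rcases hpre with h | h | h | h
        · omega
        · exact Or.inl h
        · exact Or.inr (Or.inl h)
        · exact Or.inr (Or.inr h)
      have hne0 : ¬ ((0 : Int) = buffer_size) := by omega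
      have hloop : pvLoopA buffer_size 2 [] [] [[]] = ([], [[]]) := by
        rw [show (2 : Nat) = 1 + 1 from rfl, pvLoopA.eq_def]
        simp [hne0]
      have hq0 : PySem.Int.floordiv ((List.length ([] : List Int)) : Int) buffer_size = 0 := by
        simp [PySem.Int.floordiv]
      have hlev : pvLevelsB ([] : List Int) buffer_size 0 1 0 = ([[]], 0) := by
        rw [show (1 : Nat) = 0 + 1 from rfl, pvLevelsB, if_neg (by decide)]
        rfl
      have hslice : PySem.List.slice ([] : List Int) (some 0) none = ([] : List Int) := by
        simp [PySem.List.slice]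
      simp only [Logarithmic_merge, Logarithmic_merge_alt, hidx, if_neg h0]
      rw [show 2 * ([] : List Int).length + 2 = 2 from rfl, hloop, hq0,
        PySem.Int.bitLength_zero, show max 0 1 = 1 from rfl, hlev, hslice]
      simp [h0, PySem.List.sorted_eq_nil_iff]
    · -- buffer_size > 0: the main equivalence
      have hpos : 0 ≤ buffer_size := by omega
      have hb' : buffer_size = ((buffer_size.toNat : Nat) : Int) := by omega
      have hbpos : 0 < buffer_size.toNat := by omega
      have hcore := core_eq (PySem.List.slice index none (some cut_off)) buffer_size.toNat hbpos
      simp only [show pvSort = fun l => PySem.List.sorted l (fun x => x) false from rfl] at hcore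
      simp only [Logarithmic_merge, Logarithmic_merge_alt, if_neg h0]
      rw [hb']
      exact hcore
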